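-- pv_equiv track=rewrite | github.com/batamorphism/Coding | Python/AtCoder/old/ABC195-C-Comma.py | max_999
-- ===== SOURCE A (Python) =====
-- def max_999(n):
--     # n以下の最大の999,999,...となる整数を返す
--     digits = len(str(n))
--     how_many_3numbers = digits//3
--     ret = 0
--     for num in range(how_many_3numbers+1):
--         if n >= (1000**num-1):
--             ret = 1000**num-1
--         else:
--             break
--     return ret
-- ===== SOURCE B (Python) =====
-- def max_999(n):
--     # Closed-form: jump to the candidate from the digit count, one step down if it overshoots.
--     if n < 0:
--         return 0
--     k = len(str(n)) // 3
--     cand = 10 ** (3 * k) - 1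
--     if cand > n:
--         cand = 10 ** (3 * (k - 1)) - 1
--     return cand
-- ===== Notes on version B (the rewrite author's own statement) =====
-- stated objective: simpler
-- what changed: Replaces the ascending scan over all powers 1000**num with a closed-form candidate 10**(3*(len(str(n))//3))-1 plus a single one-step correction when it overshoots.
import Mathlib
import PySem

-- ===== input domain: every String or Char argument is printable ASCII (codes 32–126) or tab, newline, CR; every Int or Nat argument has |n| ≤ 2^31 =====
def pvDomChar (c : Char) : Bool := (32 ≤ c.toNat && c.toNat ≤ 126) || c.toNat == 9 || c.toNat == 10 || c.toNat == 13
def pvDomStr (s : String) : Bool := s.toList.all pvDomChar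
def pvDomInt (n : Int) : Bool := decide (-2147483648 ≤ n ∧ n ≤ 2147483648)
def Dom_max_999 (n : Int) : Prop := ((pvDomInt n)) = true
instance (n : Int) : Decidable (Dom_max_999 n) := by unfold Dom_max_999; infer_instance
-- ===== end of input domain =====

-- B replaces A's ascending scan over powers with a closed-form candidate from the digit
-- count plus one overshoot correction (objective: simpler).

-- ===== PORT A =====
-- the for-loop with break: returns ret at the first failing test (break), else the last assignment
-- 1000**num with num drawn from range(...), always ≥ 0, so `.toNat` on the exponent is exact
def max999Loop (n : Int) : List Int → Int → Int
  | [], ret => ret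
  | num :: rest, ret =>
    if n ≥ (1000 : Int) ^ num.toNat - 1 then
      max999Loop n rest ((1000 : Int) ^ num.toNat - 1)
    else ret

def max_999 (n : Int) : Int :=
  let digits := PySem.Str.len (PySem.Int.toStr n)
  let how_many_3numbers := PySem.Int.floordiv digits 3
  max999Loop n (PySem.List.pyRange 0 (how_many_3numbers + 1) 1) 0

-- ===== PORT B =====
-- 10 ** (3*k) and 10 ** (3*(k-1)): the second is only reached when cand > n ≥ 0 forces k ≥ 1,
-- so both exponents are ≥ 0 and `.toNat` is exact
def max_999_alt (n : Int) : Int :=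
  if n < 0 then 0
  else
    let k := PySem.Int.floordiv (PySem.Str.len (PySem.Int.toStr n)) 3
    let cand := (10 : Int) ^ (3 * k).toNat - 1
    if cand > n then (10 : Int) ^ (3 * (k - 1)).toNat - 1 else cand

-- ===== PRECONDITION & SPEC =====
def Spec_max_999 (n : Int) (out : Int) : Prop := out = max_999_alt n
instance (n : Int) (out : Int) : Decidable (Spec_max_999 n out) := by unfold Spec_max_999; infer_instance

-- ===== CLAIM (what is proved, stated in full; the proofs are below) =====
def Claim_equal_max_999 : Prop := ∀ (n : Int), Dom_max_999 n → Spec_max_999 n (max_999 n)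

-- ===== LEMMAS AND PROOFS =====

-- digit-length upper bound: n < 10^e → len(str n) ≤ e (n ≥ 0)
lemma toChars_length_le (n : Int) (e : Nat) (he : 0 < e) (h0 : 0 ≤ n)
    (h : n < (10 : Int) ^ e) : (PySem.Int.toChars n).length ≤ e := by
  have : ¬ n < 0 := by omega
  simp only [PySem.Int.toChars, this, if_false]
  apply Nat.toDigits_length 10 n.toNat e he
  have : ((n.toNat : Int)) < ((10 : Int)) ^ e := by rwa [Int.toNat_of_nonneg h0]
  exact_mod_cast this

lemma key (n : Int) (hlo : -2147483648 ≤ n) (hhi : n ≤ 2147483648) :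
    max_999 n = max_999_alt n := by
  by_cases hneg : n < 0
  · -- A: the first test (num = 0) already fails, loop breaks with ret = 0; B: 0
    have hk : (0 : Int) ≤ PySem.Int.floordiv (PySem.Str.len (PySem.Int.toStr n)) 3 := by
      rw [PySem.Int.floordiv_eq_ediv_of_pos (by norm_num)]
      have : (0 : Int) ≤ PySem.Str.len (PySem.Int.toStr n) := by
        simp [PySem.Str.len_eq]
      omega
    simp only [max_999, max_999_alt, if_pos hneg]
    rw [PySem.List.pyRange_one_cons (by omega)]
    simp only [max999Loop]
    rw [if_neg (by simp; omega)]
  · -- n ≥ 0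
    have hpos : (0 : Int) ≤ n := not_lt.mp hneg
    simp only [max_999, max_999_alt, if_neg hneg]
    set d : Nat := (PySem.Int.toChars n).length with hd
    have hlen : PySem.Str.len (PySem.Int.toStr n) = (d : Int) := by
      simp [PySem.Str.len_eq, ← PySem.Int.toList_toStr, hd]
    rw [hlen]
    have hfd : PySem.Int.floordiv (d : Int) 3 = ((d / 3 : Nat) : Int) :=
      PySem.Int.floordiv_natCast d 3
    rw [hfd]
    set k : Nat := d / 3 with hk
    -- d ≤ 10 since n ≤ 2^31 < 10^10
    have hd10 : d ≤ 10 := toChars_length_le n 10 (by norm_num) hpos (by omega)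
    have hk3 : k ≤ 3 := by omega
    -- digit-count lower bound: 3e ≤ d forces 10^(3e-3) ≤ n
    have hlow : ∀ e : Nat, 0 < e → 3 * e ≤ d → (10 : Int) ^ (3 * e - 3) ≤ n := by
      intro e he hde
      by_contra hc
      have hc' : n < (10 : Int) ^ (3 * e - 3) := not_le.mp hc
      rcases Nat.lt_or_ge e 2 with h2 | h2
      · have he1 : e = 1 := by omega
        subst he1
        simp only [show 3 * 1 - 3 = 0 from rfl, pow_zero] at hc'
        have hn0 : n = 0 := by omega
        have hd1 : d = 1 := by rw [hd, hn0]; decide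
        omega
      · have h1 : d ≤ 3 * e - 3 := toChars_length_le n (3 * e - 3) (by omega) hpos hc'
        omega
    -- evaluate both sides for each of the four possible k
    interval_cases k
    · -- k = 0
      rw [show PySem.List.pyRange 0 (((0:Nat):Int) + 1) 1 = [0] by decide]
      simp only [max999Loop]
      first
      | (norm_num
         simp only [show Int.toNat 2 = 2 by decide, show Int.toNat 3 = 3 by decide,
           show Int.toNat 6 = 6 by decide, show Int.toNat 9 = 9 by decide,
           show Int.toNat (-3) = 0 by decide]
         norm_num
         split_ifs <;> omega)
      | (norm_num
         simp only [show Int.toNat 2 = 2 by decide, show Int.toNat 3 = 3 by decide,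
           show Int.toNat 6 = 6 by decide, show Int.toNat 9 = 9 by decide,
           show Int.toNat (-3) = 0 by decide]
         norm_num)
      | norm_num
    · -- k = 1
      rw [show PySem.List.pyRange 0 (((1:Nat):Int) + 1) 1 = [0, 1] by decide]
      simp only [max999Loop]
      first
      | (norm_num
         simp only [show Int.toNat 2 = 2 by decide, show Int.toNat 3 = 3 by decide,
           show Int.toNat 6 = 6 by decide, show Int.toNat 9 = 9 by decide,
           show Int.toNat (-3) = 0 by decide]
         norm_num
         split_ifs <;> omega)
      | (norm_num
         simp only [show Int.toNat 2 = 2 by decide, show Int.toNat 3 = 3 by decide,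
           show Int.toNat 6 = 6 by decide, show Int.toNat 9 = 9 by decide,
           show Int.toNat (-3) = 0 by decide]
         norm_num)
      | norm_num
    · -- k = 2
      have h1 : (1000 : Int) ≤ n := by
        have := hlow 2 (by norm_num) (by omega)
        norm_num at this; omega
      rw [show PySem.List.pyRange 0 (((2:Nat):Int) + 1) 1 = [0, 1, 2] by decide]
      simp only [max999Loop]
      first
      | (norm_num
         simp only [show Int.toNat 2 = 2 by decide, show Int.toNat 3 = 3 by decide,
           show Int.toNat 6 = 6 by decide, show Int.toNat 9 = 9 by decide,
           show Int.toNat (-3) = 0 by decide]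
         norm_num
         split_ifs <;> omega)
      | (norm_num
         simp only [show Int.toNat 2 = 2 by decide, show Int.toNat 3 = 3 by decide,
           show Int.toNat 6 = 6 by decide, show Int.toNat 9 = 9 by decide,
           show Int.toNat (-3) = 0 by decide]
         norm_num)
      | norm_num
    · -- k = 3
      have h1 : (1000000 : Int) ≤ n := by
        have := hlow 3 (by norm_num) (by omega)
        norm_num at this; omega
      rw [show PySem.List.pyRange 0 (((3:Nat):Int) + 1) 1 = [0, 1, 2, 3] by decide]
      simp only [max999Loop]
      first
      | (norm_num
         simp only [show Int.toNat 2 = 2 by decide, show Int.toNat 3 = 3 by decide,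
           show Int.toNat 6 = 6 by decide, show Int.toNat 9 = 9 by decide,
           show Int.toNat (-3) = 0 by decide]
         norm_num
         split_ifs <;> omega)
      | (norm_num
         simp only [show Int.toNat 2 = 2 by decide, show Int.toNat 3 = 3 by decide,
           show Int.toNat 6 = 6 by decide, show Int.toNat 9 = 9 by decide,
           show Int.toNat (-3) = 0 by decide]
         norm_num)
      | norm_num

-- ===== VERDICT (by name: the statement is the Claim_ definition above) =====
theorem max_999_spec : Claim_equal_max_999 := by
  intro n hdom
  have h : -2147483648 ≤ n ∧ n ≤ 2147483648 := by
    simpa [Dom_max_999, pvDomInt] using hdom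
  exact (key n h.1 h.2).symm ▸ rfl
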